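-- pv_equiv track=rewrite | github.com/MIT-LCP/wfdb-python | wfdb/io/_signal.py | describe_list_indices
-- ===== SOURCE A (Python) =====
-- def describe_list_indices(full_list):
--     """
--     Describe the indices of the given list.
--
--     Parameters
--     ----------
--     full_list : list
--         The list of items to order.
--
--     Returns
--     -------
--     unique_elements : list
--         A list of the unique elements of the list, in the order in which
--         they first appear.
--     element_indices : dict
--         A dictionary of lists for each unique element, giving all the
--         indices in which they appear in the original list.
--
--     """
--     unique_elements = []
--     element_indices = {}
--
--     for i in range(len(full_list)):
--         item = full_list[i]
--         # new item
--         if item not in unique_elements: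
--             unique_elements.append(item)
--             element_indices[item] = [i]
--         # previously seen item
--         else:
--             element_indices[item].append(i)
--     return unique_elements, element_indices
-- ===== SOURCE B (Python) =====
-- def describe_list_indices(full_list):
--     # Staged, state-free decomposition: first dedupe in first-appearance order,
--     # then compute each element's index list by a direct comprehension scan.
--     unique_elements = list(dict.fromkeys(full_list))
--     element_indices = {
--         item: [i for i, x in enumerate(full_list) if x == item]
--         for item in unique_elements
--     }
--     return unique_elements, element_indices
-- ===== Notes on version B (the rewrite author's own statement) =====
-- stated objective: simpler
-- what changed: Replaced A's single stateful loop with two branches and two mutated accumulators by two state-free staged passes: an ordered dedup (dict.fromkeys) followed by a per-element index comprehension building the dict in one expression.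
import Mathlib
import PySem

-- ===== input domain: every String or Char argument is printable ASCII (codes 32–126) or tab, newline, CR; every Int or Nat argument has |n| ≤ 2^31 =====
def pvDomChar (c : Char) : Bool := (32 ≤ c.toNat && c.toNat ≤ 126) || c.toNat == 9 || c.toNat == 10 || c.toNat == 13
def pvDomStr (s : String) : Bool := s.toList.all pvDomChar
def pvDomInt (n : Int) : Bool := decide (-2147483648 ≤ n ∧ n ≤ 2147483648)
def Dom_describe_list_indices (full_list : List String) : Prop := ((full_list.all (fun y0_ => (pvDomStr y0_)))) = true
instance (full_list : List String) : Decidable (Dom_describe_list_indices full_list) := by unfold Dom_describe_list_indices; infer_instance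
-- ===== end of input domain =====

-- B replaces A's single stateful two-branch loop by two state-free staged passes
-- (ordered dedup, then a per-element index comprehension): simpler.


-- ===== PORT A =====
-- for i in range(len(full_list)): item = full_list[i] — iterated as the (index, item) pairs.
-- In the else branch the key is present, so `element_indices[item].append(i)` is exactly
-- `modify item [] (· ++ [i])`.
def dliStepA (st : List String × PySem.Dict String (List Int)) (p : Int × String) :
    List String × PySem.Dict String (List Int) :=
  if ¬ st.1.contains p.2 then
    (st.1 ++ [p.2], st.2.insert p.2 [p.1])
  else
    (st.1, st.2.modify p.2 [] (· ++ [p.1]))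

def describe_list_indices (full_list : List String) : List String × (List (String × List Int)) :=
  let st := (PySem.List.enumerate full_list).foldl dliStepA ([], PySem.Dict.empty)
  (st.1, st.2.items)

-- ===== PORT B =====
-- [i for i, x in enumerate(full_list) if x == item]
def dliIx (full_list : List String) (item : String) : List Int :=
  (((PySem.List.enumerate full_list).filter (fun p => p.2 == item)).map (·.1))

def describe_list_indices_alt (full_list : List String) : List String × (List (String × List Int)) :=
  let unique_elements := PySem.List.dedup full_list
  let element_indices := unique_elements.foldl
    (fun d item => d.insert item (dliIx full_list item)) PySem.Dict.empty
  (unique_elements, element_indices.items)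

-- ===== PRECONDITION & SPEC =====
def Spec_describe_list_indices (full_list : List String) (out : List String × (List (String × List Int))) : Prop := out = describe_list_indices_alt full_list
instance (full_list : List String) (out : List String × (List (String × List Int))) : Decidable (Spec_describe_list_indices full_list out) := by unfold Spec_describe_list_indices; infer_instance

-- ===== CLAIM (what is proved, stated in full; the proofs are below) =====
def Claim_equal_describe_list_indices : Prop := ∀ (full_list : List String), Dom_describe_list_indices full_list → Spec_describe_list_indices full_list (describe_list_indices full_list)

-- ===== LEMMAS AND PROOFS =====

-- B's dict over the deduped keys, as a function of the list (helper for the invariant).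
def dliDictB (l : List String) : PySem.Dict String (List Int) :=
  (PySem.List.dedup l).foldl (fun d item => d.insert item (dliIx l item)) PySem.Dict.empty

theorem dliDictB_items (l : List String) :
    (dliDictB l).items = (PySem.List.dedup l).map (fun k => (k, dliIx l k)) := by
  unfold dliDictB
  have h := PySem.Dict.items_foldl_insert_fresh (PySem.List.dedup l) (fun a => a) (dliIx l)
    PySem.Dict.empty (by intro a _; simp [PySem.Dict.contains_empty])
    (by simp)
  simp only [h]
  simp [PySem.Dict.empty]

theorem dliIx_snoc (l : List String) (x k : String) :
    dliIx (l ++ [x]) k = dliIx l k ++ (if x == k then [((l.length : Int))] else []) := by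
  unfold dliIx
  rw [PySem.List.enumerate_append]
  simp only [List.filter_append, List.map_append]
  congr 1
  by_cases h : x == k <;> simp [PySem.List.enumerate, h]

theorem dliIx_of_not_mem (l : List String) (k : String) (h : k ∉ l) : dliIx l k = [] := by
  unfold dliIx
  rw [List.filter_eq_nil_iff.mpr, List.map_nil]
  intro p hp
  rcases (PySem.List.mem_enumerate_iff _ _ _).mp hp with ⟨j, hj, rfl⟩
  simp only [beq_iff_eq]
  intro hc
  exact h (hc ▸ List.getElem_mem hj)

theorem dedup_snoc (l : List String) (x : String) :
    PySem.List.dedup (l ++ [x]) =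
      if (PySem.List.dedup l).contains x then PySem.List.dedup l
      else PySem.List.dedup l ++ [x] := by
  simp only [PySem.List.dedup_eq_ofList, PySem.Set.ofList_eq_foldl, List.foldl_append,
    List.foldl_cons, List.foldl_nil]
  rfl

-- Main invariant: A's fold over the enumerated list lands exactly on B's two stages.
theorem dli_fold_eq (l : List String) :
    (PySem.List.enumerate l).foldl dliStepA ([], PySem.Dict.empty) =
      (PySem.List.dedup l, dliDictB l) := by
  induction l using List.reverseRecOn with
  | nil => rfl
  | append_singleton l x ih =>
    rw [PySem.List.enumerate_append, List.foldl_append, ih]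
    have hnodup : (PySem.List.dedup l).Nodup := PySem.List.nodup_dedup l
    have hkeys : (dliDictB l).keys = PySem.List.dedup l := by
      simp only [PySem.Dict.keys, dliDictB_items, List.map_map]
      simp [Function.comp_def]
    have hmem : ∀ k : String, (PySem.List.dedup l).contains k = true ↔ k ∈ l := by
      intro k
      rw [List.contains_iff_mem]; exact PySem.List.mem_dedup _ _
    by_cases hx : x ∈ l
    · -- previously seen item: A modifies the key in place
      have hc : (PySem.List.dedup l).contains x = true := (hmem x).mpr hx
      have hd : PySem.List.dedup (l ++ [x]) = PySem.List.dedup l := by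
        rw [dedup_snoc, if_pos hc]
      have hcd : (dliDictB l).contains x = true := by
        rw [PySem.Dict.contains_iff_mem_keys, hkeys]
        exact (PySem.List.mem_dedup _ _).mpr hx
      have hgetD : (dliDictB l).getD x [] = dliIx l x := by
        apply PySem.Dict.getD_of_mem_items
        · rw [dliDictB_items]
          exact List.mem_map.mpr ⟨x, (PySem.List.mem_dedup _ _).mpr hx, rfl⟩
        · rw [hkeys]; exact hnodup
      simp only [PySem.List.enumerate, List.foldl_cons, List.foldl_nil, dliStepA,
        List.contains_iff_mem, PySem.List.mem_dedup, hx, not_true_eq_false, if_neg, not_false_eq_true]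
      refine Prod.ext hd.symm ?_
      rw [PySem.Dict.modify, hgetD]
      apply PySem.Dict.ext
      rw [PySem.Dict.items_insert_of_contains _ _ hcd, dliDictB_items, dliDictB_items,
        hd, List.map_map]
      refine List.map_congr_left ?_
      intro k _
      by_cases hk : k = x
      · subst hk; simp [dliIx_snoc]
      · simp [hk, dliIx_snoc, Ne.symm hk]
    · -- new item: A appends the key
      have hc : (PySem.List.dedup l).contains x = false := by
        rw [Bool.eq_false_iff]; intro h; exact hx ((hmem x).mp h)
      have hd : PySem.List.dedup (l ++ [x]) = PySem.List.dedup l ++ [x] := by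
        rw [dedup_snoc, hc]; rfl
      have hcd : (dliDictB l).contains x = false := by
        rw [Bool.eq_false_iff, Ne, PySem.Dict.contains_iff_mem_keys, hkeys]
        intro h; exact hx ((PySem.List.mem_dedup _ _).mp h)
      simp only [PySem.List.enumerate, List.foldl_cons, List.foldl_nil, dliStepA,
        List.contains_iff_mem, PySem.List.mem_dedup, hx, not_false_eq_true, if_pos]
      refine Prod.ext hd.symm ?_
      apply PySem.Dict.ext
      rw [PySem.Dict.items_insert_of_not_contains _ _ hcd, dliDictB_items, dliDictB_items,
        hd, List.map_append]
      congr 1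
      · refine List.map_congr_left ?_
        intro k hk
        have hkx : ¬ (x == k) = true := by
          simp only [beq_iff_eq]
          intro h; subst h; exact hx ((PySem.List.mem_dedup _ _).mp hk)
        rw [dliIx_snoc, if_neg hkx, List.append_nil]
      · rw [List.map_singleton, dliIx_snoc, dliIx_of_not_mem l x hx]
        simp

-- ===== VERDICT (by name: the statement is the Claim_ definition above) =====
theorem describe_list_indices_spec : Claim_equal_describe_list_indices := by
  intro full_list _
  unfold Spec_describe_list_indices describe_list_indices describe_list_indices_alt
  rw [dli_fold_eq]
  rfl
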